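-- pv_equiv track=rewrite | github.com/Cyb3rMutant/udp | udp_server.py | text_to_binary_array
-- ===== SOURCE A (Python) =====
-- def text_to_binary_array(text):
--     binary_string = ""
--     for char in text:
--         # get decimal code of character from ASCII table
--         binary_byte = bin(char)[2:].zfill(8)  # convert decimal to binary byte
--         binary_string += binary_byte
--
--     # split binary string into 2-byte chunks
--     binary_array = [binary_string[i:i+16] for i in range(0, len(binary_string), 16)]
--
--     if len(text) % 2:
--         binary_array[-1] = binary_array[-1].ljust(16, '0')
--
--     return binary_array
-- ===== SOURCE B (Python) =====
-- def text_to_binary_array(text):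
--     # Streaming chunker: keep a small carry of <16 bits and emit each 16-bit
--     # chunk as soon as it is complete, instead of building one big string and
--     # slicing it by offsets.
--     chunks = []
--     carry = ""
--     for char in text:
--         carry += bin(char)[2:].zfill(8)
--         while len(carry) >= 16:
--             chunks.append(carry[:16])
--             carry = carry[16:]
--     if carry:
--         chunks.append(carry)
--     if len(text) % 2:
--         chunks[-1] = chunks[-1].ljust(16, '0')
--     return chunks
-- ===== Notes on version B (the rewrite author's own statement) =====
-- stated objective: alternative
-- what changed: B streams: it keeps a <16-char carry and emits each 16-bit chunk as soon as it is complete during the single pass over the bytes, instead of A's concatenating all bits into one big string and then re-slicing it at numeric offsets.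
import Mathlib
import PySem

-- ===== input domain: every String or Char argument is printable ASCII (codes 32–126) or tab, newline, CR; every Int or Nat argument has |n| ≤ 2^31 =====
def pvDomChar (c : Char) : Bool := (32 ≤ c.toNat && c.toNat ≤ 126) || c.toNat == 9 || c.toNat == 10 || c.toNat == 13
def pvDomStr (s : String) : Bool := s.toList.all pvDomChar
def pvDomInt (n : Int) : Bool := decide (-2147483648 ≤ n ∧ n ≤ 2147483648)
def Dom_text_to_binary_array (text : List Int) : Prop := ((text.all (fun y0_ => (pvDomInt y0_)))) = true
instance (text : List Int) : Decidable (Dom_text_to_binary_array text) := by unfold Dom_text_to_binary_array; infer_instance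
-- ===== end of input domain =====

-- B replaces A's build-one-string-then-slice-at-offsets by a streaming pass that emits each
-- 16-bit chunk as soon as it is complete (alternative decomposition, same O(n) cost).

-- ===== PORT A =====
-- bin(char)[2:].zfill(8)  (both Python sources contain this very expression)
def binPiece (n : Int) : List Char :=
  PySem.Chars.zfill (PySem.List.slice (PySem.Int.toBinChars0b n) (some 2) none) 8

-- s.ljust(16, '0') — right-pad with '0' to width 16 (exact hand port; PySem has no ljust)
def ljust16 (cs : List Char) : List Char := cs ++ List.replicate (16 - cs.length) '0'

def text_to_binary_array (text : List Int) : List String :=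
  let binary_string : List Char := text.foldl (fun acc ch => acc ++ binPiece ch) []
  let binary_array : List (List Char) :=
    (PySem.List.pyRange 0 (binary_string.length : Int) 16).map
      (fun i => PySem.List.slice binary_string (some i) (some (i + 16)))
  -- binary_array[-1] = binary_array[-1].ljust(16,'0'); Python would raise on an empty list,
  -- which is unreachable here (odd len(text) forces a nonempty array), so getLastD is exact
  let binary_array :=
    if text.length % 2 = 1 then binary_array.dropLast ++ [ljust16 (binary_array.getLastD [])]
    else binary_array
  binary_array.map String.ofList

-- ===== PORT B =====
-- the 'while len(carry) >= 16: chunks.append(carry[:16]); carry = carry[16:]' loop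
def flush16 (chunks : List (List Char)) (carry : List Char) :
    List (List Char) × List Char :=
  if 16 ≤ carry.length then flush16 (chunks ++ [carry.take 16]) (carry.drop 16)
  else (chunks, carry)
termination_by carry.length
decreasing_by simp_all; omega

def text_to_binary_array_alt (text : List Int) : List String :=
  let st : List (List Char) × List Char :=
    text.foldl (fun st ch => flush16 st.1 (st.2 ++ binPiece ch)) ([], [])
  let chunks := if st.2.isEmpty then st.1 else st.1 ++ [st.2]
  let chunks :=
    if text.length % 2 = 1 then chunks.dropLast ++ [ljust16 (chunks.getLastD [])]
    else chunks
  chunks.map String.ofList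

-- ===== PRECONDITION & SPEC =====
def Spec_text_to_binary_array (text : List Int) (out : List String) : Prop := out = text_to_binary_array_alt text
instance (text : List Int) (out : List String) : Decidable (Spec_text_to_binary_array text out) := by unfold Spec_text_to_binary_array; infer_instance

-- ===== CLAIM (what is proved, stated in full; the proofs are below) =====
def Claim_equal_text_to_binary_array : Prop := ∀ (text : List Int), Dom_text_to_binary_array text → Spec_text_to_binary_array text (text_to_binary_array text)

-- ===== LEMMAS AND PROOFS =====

-- reference chunker: cut a char list into successive 16-char pieces
def chunks16 (s : List Char) : List (List Char) :=
  if s = [] then [] else s.take 16 :: chunks16 (s.drop 16)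
termination_by s.length
decreasing_by cases s with | nil => simp_all | cons a t => simp

lemma chunks16_nil : chunks16 [] = [] := by simp [chunks16]

lemma chunks16_cons (s : List Char) (h : s ≠ []) :
    chunks16 s = s.take 16 :: chunks16 (s.drop 16) := by
  rw [chunks16]; simp [h]

-- A's comprehension over range(0, len, 16) with slices IS chunks16
-- range(0, n, 16) for n > 0 starts at 0 and the rest is the shifted range of n-16
lemma pyRange16_nil (n : Int) (h : n ≤ 0) : PySem.List.pyRange 0 n 16 = [] := by
  rw [PySem.List.pyRange_of_pos 0 n (by norm_num)]
  simp; omega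

lemma pyRange16_cons (n : Int) (h : 0 < n) :
    PySem.List.pyRange 0 n 16 = 0 :: (PySem.List.pyRange 0 (n - 16) 16).map (· + 16) := by
  rw [PySem.List.pyRange_of_pos 0 n (by norm_num),
      PySem.List.pyRange_of_pos 0 (n - 16) (by norm_num)]
  have hsplit : ((n - 0 + 16 - 1) / 16).toNat
      = (if 0 < n - 16 then ((n - 16 - 0 + 16 - 1) / 16).toNat else 0) + 1 := by
    have h1 : n - 0 + 16 - 1 = (n - 16 - 0 + 16 - 1) + 1 * 16 := by ring
    have h2 : (n - 0 + 16 - 1) / 16 = (n - 16 - 0 + 16 - 1) / 16 + 1 := by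
      rw [h1, Int.add_mul_ediv_right _ _ (by norm_num)]
    split_ifs with hn
    · have : 0 ≤ (n - 16 - 0 + 16 - 1) / 16 := Int.ediv_nonneg (by omega) (by norm_num)
      omega
    · have : (n - 16 - 0 + 16 - 1) / 16 = 0 := by
        apply Int.ediv_eq_zero_of_lt <;> omega
      omega
  rw [if_pos h, hsplit, List.range_succ_eq_map, List.map_cons, List.map_map, List.map_map]
  refine List.cons_eq_cons.mpr ⟨by norm_num, ?_⟩
  apply List.map_congr_left
  intro k _
  simp only [Function.comp_apply]
  push_cast
  ring

lemma A_chunks (s : List Char) :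
    (PySem.List.pyRange 0 (s.length : Int) 16).map
      (fun i => PySem.List.slice s (some i) (some (i + 16))) = chunks16 s := by
  induction hn : s.length using Nat.strong_induction_on generalizing s with
  | _ n ih =>
  subst hn
  by_cases hs : s = []
  · subst hs; simp [pyRange16_nil, chunks16_nil]
  · have hlen : 0 < s.length := List.length_pos_iff.mpr hs
    rw [pyRange16_cons _ (by exact_mod_cast hlen), chunks16_cons s hs, List.map_cons,
        List.map_map]
    congr 1
    · show PySem.List.slice s (some 0) (some (0 + 16)) = s.take 16
      have := PySem.List.slice_natCast_add s 0 16
      simpa using this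
    · -- tail: shift by 16 into the dropped list
      have ih' := ih (s.drop 16).length (by simp; omega) (s.drop 16) rfl
      rw [← ih']
      have hdl : ((s.drop 16).length : Int) = (s.length : Int) - 16 ∨
          ((s.drop 16).length = 0 ∧ (s.length : Int) - 16 ≤ 0) := by
        simp [List.length_drop]; omega
      have hrange : PySem.List.pyRange 0 ((s.length : Int) - 16) 16
          = PySem.List.pyRange 0 ((s.drop 16).length : Int) 16 := by
        rcases hdl with h | ⟨h1, h2⟩
        · rw [h]
        · rw [h1, pyRange16_nil _ h2]; simp [PySem.List.pyRange]
      rw [← hrange]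
      apply List.map_congr_left
      intro i hi
      have hi' : 0 ≤ i := by
        rcases (PySem.List.mem_pyRange_iff_of_pos (x := i) (by norm_num : (0:Int) < 16)).1 hi
          with ⟨hle, _⟩
        exact hle
      show PySem.List.slice s (some (i + 16)) (some (i + 16 + 16))
          = PySem.List.slice (s.drop 16) (some i) (some (i + 16))
      rw [PySem.List.slice_toNat s (by omega) (by omega),
          PySem.List.slice_toNat (s.drop 16) hi' (by omega)]
      have e1 : (i + 16).toNat = i.toNat + 16 := by omega
      have e2 : (i + 16 + 16).toNat = i.toNat + 32 := by omega
      rw [e1, e2, List.drop_drop]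
      congr 1
      · omega
      · congr 1; omega

-- flush16 keeps a short carry
lemma flush16_snd_lt (chunks : List (List Char)) (carry : List Char) :
    (flush16 chunks carry).2.length < 16 := by
  fun_induction flush16 chunks carry with
  | case1 chunks carry h ih => exact ih
  | case2 chunks carry h => simpa using h

-- flush16's output, followed by chunking the rest, is chunking the whole
lemma flush16_chunks (carry : List Char) (chunks : List (List Char)) (t : List Char) :
    (flush16 chunks carry).1 ++ chunks16 ((flush16 chunks carry).2 ++ t)
      = chunks ++ chunks16 (carry ++ t) := by
  fun_induction flush16 chunks carry with
  | case1 chunks carry h ih =>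
    rw [ih, chunks16_cons (carry ++ t)
      (by intro hc
          have hc1 : carry = [] := (List.append_eq_nil_iff.mp hc).1
          simp [hc1] at h)]
    rw [List.take_append_of_le_length (show (16:Nat) ≤ carry.length from h),
        List.drop_append_of_le_length (show (16:Nat) ≤ carry.length from h)]
    simp
  | case2 chunks carry h => rfl

lemma chunks16_short (s : List Char) (h : s.length < 16) :
    chunks16 s = if s = [] then [] else [s] := by
  by_cases hs : s = []
  · simp [hs, chunks16_nil]
  · rw [chunks16_cons s hs, if_neg hs, List.take_of_length_le (by omega),
        List.drop_eq_nil_of_le (by omega), chunks16_nil]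

-- the streaming loop produces exactly chunks16 of the concatenation
lemma stream_eq (text : List Int) (chunks : List (List Char)) (carry : List Char)
    (hc : carry.length < 16) :
    (let st := text.foldl (fun st ch => flush16 st.1 (st.2 ++ binPiece ch)) (chunks, carry);
     if st.2.isEmpty then st.1 else st.1 ++ [st.2])
      = chunks ++ chunks16 (carry ++ text.flatMap binPiece) := by
  induction text generalizing chunks carry with
  | nil =>
    simp only [List.foldl_nil, List.flatMap_nil, List.append_nil]
    rw [chunks16_short carry hc]
    by_cases hc0 : carry = [] <;> simp [hc0]
  | cons ch rest ih =>
    simp only [List.foldl_cons, List.flatMap_cons]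
    have hlt := flush16_snd_lt chunks (carry ++ binPiece ch)
    have := ih (flush16 chunks (carry ++ binPiece ch)).1
      (flush16 chunks (carry ++ binPiece ch)).2 hlt
    simp only at this ⊢
    rw [this, flush16_chunks, List.append_assoc]

-- ===== VERDICT (by name: the statement is the Claim_ definition above) =====
theorem text_to_binary_array_spec : Claim_equal_text_to_binary_array := by
  intro text _
  show text_to_binary_array text = text_to_binary_array_alt text
  have h2 := stream_eq text [] [] (by simp)
  simp only [List.nil_append] at h2
  unfold text_to_binary_array text_to_binary_array_alt
  simp only [PySem.List.foldl_append_eq_flatMap, List.nil_append, A_chunks]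
  rw [h2]
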